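-- pv_equiv track=rewrite | github.com/kangk1204/illumeta | scripts/build_benchmark_figures.py | select_primary
-- ===== SOURCE A (Python) =====
-- def select_primary(rows, primary_only):
--     if not primary_only:
--         return rows
--     grouped = {}
--     for row in rows:
--         gse_id = (row.get("gse_id") or "").strip()
--         if not gse_id:
--             continue
--         grouped.setdefault(gse_id, []).append(row)
--     selected = []
--     for gse_id, items in grouped.items():
--         primary = None
--         for row in items:
--             if row.get("pipeline") == row.get("primary_branch"):
--                 primary = row
--                 break
--         if primary is None:
--             for row in items:
--                 if row.get("pipeline") == "Minfi":
--                     primary = row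
--                     break
--         if primary is None:
--             primary = items[0]
--         selected.append(primary)
--     return selected
-- ===== SOURCE B (Python) =====
-- def select_primary(rows, primary_only):
--     if not primary_only:
--         return rows
--     best = {}
--     for row in rows:
--         gse_id = (row.get("gse_id") or "").strip()
--         if not gse_id:
--             continue
--         pipeline = row.get("pipeline")
--         rank = 0 if pipeline == row.get("primary_branch") else (1 if pipeline == "Minfi" else 2)
--         cur = best.get(gse_id)
--         if cur is None or rank < cur[0]:
--             best[gse_id] = (rank, row)
--     return [row for _, row in best.values()]
-- ===== Notes on version B (the rewrite author's own statement) =====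
-- stated objective: simpler
-- what changed: Replaced A's two-phase group-then-scan (build per-gse_id lists of rows, then re-scan each list up to three times for primary-branch / Minfi / first row) with a single pass that keeps only the current best (rank, row) per gse_id, replacing on strictly smaller rank.
import Mathlib
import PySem

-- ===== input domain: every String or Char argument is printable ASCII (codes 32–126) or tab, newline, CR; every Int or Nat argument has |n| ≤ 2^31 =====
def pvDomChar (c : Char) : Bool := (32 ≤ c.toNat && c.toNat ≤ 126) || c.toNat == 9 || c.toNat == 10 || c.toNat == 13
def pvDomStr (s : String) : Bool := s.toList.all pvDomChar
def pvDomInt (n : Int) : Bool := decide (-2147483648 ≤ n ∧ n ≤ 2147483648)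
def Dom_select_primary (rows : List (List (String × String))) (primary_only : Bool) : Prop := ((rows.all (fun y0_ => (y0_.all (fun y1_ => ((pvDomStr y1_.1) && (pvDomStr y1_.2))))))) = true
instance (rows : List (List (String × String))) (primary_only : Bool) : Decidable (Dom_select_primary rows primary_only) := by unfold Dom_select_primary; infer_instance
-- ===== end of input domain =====

-- B replaces A's group-then-scan with a single best-rank-per-key pass; objective: simpler (same asymptotic cost).

-- row.get(k): a Python dict row is an association list; lookup is first match
def rowGet (row : List (String × String)) (k : String) : Option String :=
  (PySem.Dict.mk row).get? k

-- ===== PORT A =====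
-- the inner 'for row in items: if …: primary = row; break' loops of A, in order
def chooseA (items : List (List (String × String))) : List (String × String) :=
  match items.find? (fun row => rowGet row "pipeline" == rowGet row "primary_branch") with
  | some r => r
  | none =>
    match items.find? (fun row => rowGet row "pipeline" == some "Minfi") with
    | some r => r
    | none => PySem.List.pyGetD items 0 []

def select_primary (rows : List (List (String × String))) (primary_only : Bool) : List (List (String × String)) :=
  if !primary_only then rows
  else
    let grouped : PySem.Dict String (List (List (String × String))) :=
      rows.foldl (fun g row =>
        let gse := PySem.Str.strip ((rowGet row "gse_id").getD "")
        if gse = "" then g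
        else g.modify gse [] (fun items => items ++ [row])) PySem.Dict.empty
    grouped.items.foldl (fun sel kv => sel ++ [chooseA kv.2]) []

-- ===== PORT B =====
def rankB (row : List (String × String)) : Int :=
  if rowGet row "pipeline" == rowGet row "primary_branch" then 0
  else if rowGet row "pipeline" == some "Minfi" then 1
  else 2

def select_primary_alt (rows : List (List (String × String))) (primary_only : Bool) : List (List (String × String)) :=
  if !primary_only then rows
  else
    let best : PySem.Dict String (Int × List (String × String)) :=
      rows.foldl (fun b row =>
        let gse := PySem.Str.strip ((rowGet row "gse_id").getD "")
        if gse = "" then b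
        else
          let r := rankB row
          match b.get? gse with
          | none => b.insert gse (r, row)
          | some cur => if r < cur.1 then b.insert gse (r, row) else b) PySem.Dict.empty
    best.values.map (·.2)

-- ===== PRECONDITION & SPEC =====
def Spec_select_primary (rows : List (List (String × String))) (primary_only : Bool) (out : List (List (String × String))) : Prop := out = select_primary_alt rows primary_only
instance (rows : List (List (String × String))) (primary_only : Bool) (out : List (List (String × String))) : Decidable (Spec_select_primary rows primary_only out) := by unfold Spec_select_primary; infer_instance

-- ===== CLAIM (what is proved, stated in full; the proofs are below) =====
def Claim_equal_select_primary : Prop := ∀ (rows : List (List (String × String))) (primary_only : Bool), Dom_select_primary rows primary_only → Spec_select_primary rows primary_only (select_primary rows primary_only)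

-- ===== LEMMAS AND PROOFS =====

-- the value A's grouped dict maps a key to, as B stores it
def pvF (p : String × List (List (String × String))) : String × (Int × List (String × String)) :=
  (p.1, (rankB (chooseA p.2), chooseA p.2))

-- invariant relating A's grouped dict to B's best dict during the pass over rows
def pvInv (g : PySem.Dict String (List (List (String × String))))
    (b : PySem.Dict String (Int × List (String × String))) : Prop :=
  b.items = g.items.map pvF ∧ (∀ p ∈ g.items, p.2 ≠ []) ∧ g.keys.Nodup

theorem chooseA_singleton (r : List (String × String)) : chooseA [r] = r := by
  simp only [chooseA, List.find?]
  cases rowGet r "pipeline" == rowGet r "primary_branch" <;>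
    cases rowGet r "pipeline" == some "Minfi" <;>
      simp [PySem.List.pyGetD_zero_cons]

theorem chooseA_append (items : List (List (String × String))) (h : items ≠ [])
    (row : List (String × String)) :
    chooseA (items ++ [row]) =
      if rankB row < rankB (chooseA items) then row else chooseA items := by
  obtain ⟨a, as, rfl⟩ := List.exists_cons_of_ne_nil h
  have hrow_nonneg : ¬ rankB row < 0 := by simp only [rankB]; split_ifs <;> omega
  simp only [chooseA, List.find?_append]
  cases h0 : (a :: as).find? (fun row => rowGet row "pipeline" == rowGet row "primary_branch") with
  | some x =>
    have hx0 : rankB x = 0 := by simp [rankB, List.find?_some h0]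
    simp only [h0, Option.some_or, hx0, if_neg hrow_nonneg]
  | none =>
    have hnone0 := List.find?_eq_none.mp h0
    cases h1 : (a :: as).find? (fun row => rowGet row "pipeline" == some "Minfi") with
    | some y =>
      have hy1 : rankB y = 1 := by
        have := hnone0 y (List.mem_of_find?_eq_some h1)
        simp [rankB, List.find?_some h1, this]
      by_cases hp0 : (rowGet row "pipeline" == rowGet row "primary_branch") = true
      · have : rankB row = 0 := by simp [rankB, hp0]
        simp only [h0, h1, Option.none_or, Option.some_or, List.find?, hp0, hy1, this]
        norm_num
      · have : ¬ rankB row < 1 := by simp only [rankB]; split_ifs <;> omega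
        simp only [h0, h1, Option.none_or, Option.some_or, List.find?,
          Bool.of_not_eq_true hp0, hy1, if_neg this]
    | none =>
      have hnone1 := List.find?_eq_none.mp h1
      have ha0 := hnone0 a List.mem_cons_self
      have ha1 := hnone1 a List.mem_cons_self
      have hget : PySem.List.pyGetD (a :: as) (0 : Int) ([] : List (String × String)) = a :=
        PySem.List.pyGetD_zero_cons a as []
      have hrk : rankB (PySem.List.pyGetD (a :: as) (0 : Int) ([] : List (String × String))) = 2 := by
        rw [hget]; simp [rankB, ha0, ha1]
      by_cases hp0 : (rowGet row "pipeline" == rowGet row "primary_branch") = true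
      · have : rankB row = 0 := by simp [rankB, hp0]
        simp only [h0, h1, Option.none_or, List.find?, hp0, hrk, this]
        norm_num
      · by_cases hp1 : (rowGet row "pipeline" == some "Minfi") = true
        · have : rankB row = 1 := by simp [rankB, hp0, hp1]
          simp only [h0, h1, Option.none_or, List.find?, Bool.of_not_eq_true hp0, hp1, hrk, this]
          norm_num
        · have : rankB row = 2 := by simp [rankB, hp0, hp1]
          simp only [h0, h1, Option.none_or, List.find?, Bool.of_not_eq_true hp0,
            Bool.of_not_eq_true hp1, hrk, this, lt_self_iff_false, if_false]
          have hc : (a :: as) ++ [row] = a :: (as ++ [row]) := rfl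
          rw [hc, hget, PySem.List.pyGetD_zero_cons a (as ++ [row]) []]

theorem pvInv_step (g : PySem.Dict String (List (List (String × String))))
    (b : PySem.Dict String (Int × List (String × String))) (hInv : pvInv g b)
    (gse : String) (row : List (String × String)) :
    pvInv (g.modify gse [] (fun items => items ++ [row]))
      (let r := rankB row
       match b.get? gse with
       | none => b.insert gse (r, row)
       | some cur => if r < cur.1 then b.insert gse (r, row) else b) := by
  obtain ⟨hb, hne, hnd⟩ := hInv
  have hcontains : b.contains gse = g.contains gse := by
    simp only [PySem.Dict.contains, hb, List.any_map]; rfl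
  have hget : b.get? gse =
      (g.get? gse).map (fun items => (rankB (chooseA items), chooseA items)) := by
    simp only [PySem.Dict.get?, hb, List.find?_map, Option.map_map]; rfl
  simp only [PySem.Dict.modify]
  cases hgc : g.contains gse with
  | false =>
    have hgnone : g.get? gse = none := by
      have h := PySem.Dict.contains_eq_isSome_get? g gse
      rw [hgc] at h
      cases hq : g.get? gse with
      | none => rfl
      | some v => rw [hq] at h; simp at h
    have hbnone : b.get? gse = none := by rw [hget, hgnone]; rfl
    have hbc : b.contains gse = false := by rw [hcontains, hgc]
    simp only [hbnone]
    refine ⟨?_, ?_, ?_⟩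
    · rw [PySem.Dict.items_insert_of_not_contains b _ hbc,
        PySem.Dict.items_insert_of_not_contains g _ hgc, List.map_append,
        PySem.Dict.getD_of_not_contains g [] hgc, hb]
      simp [pvF, chooseA_singleton]
    · intro p hp
      rw [PySem.Dict.items_insert_of_not_contains g _ hgc,
        PySem.Dict.getD_of_not_contains g [] hgc] at hp
      rcases List.mem_append.mp hp with h | h
      · exact hne p h
      · simp at h; subst h; simp
    · have hkeys : (g.insert gse (g.getD gse [] ++ [row])).keys = g.keys ++ [gse] := by
        simp only [PySem.Dict.keys, PySem.Dict.items_insert_of_not_contains g _ hgc,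
          List.map_append, List.map_cons, List.map_nil]
      rw [hkeys]
      have hnm : gse ∉ g.keys := fun hm =>
        by rw [(PySem.Dict.contains_iff_mem_keys g gse).mpr hm] at hgc; simp at hgc
      simp only [List.nodup_append, List.nodup_singleton, true_and]
      refine ⟨hnd, ?_⟩
      intro a ha c hc
      rw [List.mem_singleton] at hc
      subst hc
      intro hae
      subst hae
      exact hnm ha
  | true =>
    have hsome : ∃ items, g.get? gse = some items := by
      have h := PySem.Dict.contains_eq_isSome_get? g gse
      rw [hgc] at h
      cases hq : g.get? gse with
      | none => rw [hq] at h; simp at h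
      | some v => exact ⟨v, rfl⟩
    obtain ⟨items, hgi⟩ := hsome
    have hmem : (gse, items) ∈ g.items := PySem.Dict.mem_items_of_get?_eq_some g hgi
    have hitems_ne : items ≠ [] := hne _ hmem
    have hbget : b.get? gse = some (rankB (chooseA items), chooseA items) := by
      rw [hget, hgi]; rfl
    have hbc : b.contains gse = true := by rw [hcontains, hgc]
    have hgetD : g.getD gse [] = items := PySem.Dict.getD_of_get?_eq_some g [] hgi
    have hval : ∀ p ∈ g.items, (p.1 == gse) = true → p = (gse, items) := by
      intro p hp hpk
      have hp1 : p.1 = gse := by exact eq_of_beq hpk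
      have hp2 : g.get? p.1 = some p.2 := PySem.Dict.get?_of_mem_items g (by exact hp) hnd
      rw [hp1, hgi] at hp2
      cases p
      simp_all
    have hkeys : ∀ v, (g.insert gse v).keys = g.keys := by
      intro v
      simp only [PySem.Dict.keys, PySem.Dict.items_insert_of_contains g v hgc, List.map_map]
      apply List.map_congr_left
      intro p hp
      by_cases hpk : (p.1 == gse) = true
      · simp [Function.comp, hpk, eq_of_beq hpk]
      · simp [Function.comp, hpk]
    have hne' : ∀ v, v ≠ [] → ∀ p ∈ (g.insert gse v).items,
        p.2 ≠ ([] : List (List (String × String))) := by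
      intro v hv p hp
      rw [PySem.Dict.items_insert_of_contains g v hgc] at hp
      obtain ⟨q, hq, rfl⟩ := List.mem_map.mp hp
      by_cases hqk : (q.1 == gse) = true
      · simp [hqk, hv]
      · simpa [hqk] using hne q hq
    rw [hbget, hgetD]
    by_cases hr : rankB row < rankB (chooseA items)
    · simp only [if_pos hr]
      refine ⟨?_, hne' _ (by simp), by rw [hkeys]; exact hnd⟩
      rw [PySem.Dict.items_insert_of_contains b _ hbc,
        PySem.Dict.items_insert_of_contains g _ hgc, hb, List.map_map, List.map_map]
      apply List.map_congr_left
      intro p hp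
      by_cases hpk : (p.1 == gse) = true
      · have := hval p hp hpk
        subst this
        simp [Function.comp, pvF, hpk, chooseA_append items hitems_ne row, if_pos hr]
      · simp [Function.comp, pvF, hpk]
    · simp only [if_neg hr]
      refine ⟨?_, hne' _ (by simp), by rw [hkeys]; exact hnd⟩
      rw [PySem.Dict.items_insert_of_contains g _ hgc, hb, List.map_map]
      apply List.map_congr_left
      intro p hp
      by_cases hpk : (p.1 == gse) = true
      · have := hval p hp hpk
        subst this
        simp [Function.comp, pvF, hpk, chooseA_append items hitems_ne row, if_neg hr]
      · simp [Function.comp, pvF, hpk]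

theorem pvInv_fold (rows : List (List (String × String)))
    (g : PySem.Dict String (List (List (String × String))))
    (b : PySem.Dict String (Int × List (String × String))) (hInv : pvInv g b) :
    pvInv
      (rows.foldl (fun g row =>
        let gse := PySem.Str.strip ((rowGet row "gse_id").getD "")
        if gse = "" then g else g.modify gse [] (fun items => items ++ [row])) g)
      (rows.foldl (fun b row =>
        let gse := PySem.Str.strip ((rowGet row "gse_id").getD "")
        if gse = "" then b
        else
          let r := rankB row
          match b.get? gse with
          | none => b.insert gse (r, row)
          | some cur => if r < cur.1 then b.insert gse (r, row) else b) b) := by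
  induction rows generalizing g b with
  | nil => exact hInv
  | cons row rest ih =>
    simp only [List.foldl_cons]
    by_cases hg : PySem.Str.strip ((rowGet row "gse_id").getD "") = ""
    · simp only [hg, if_pos rfl]
      exact ih _ _ hInv
    · simp only [if_neg hg]
      exact ih _ _ (pvInv_step g b hInv _ row)

-- ===== VERDICT (by name: the statement is the Claim_ definition above) =====
theorem select_primary_spec : Claim_equal_select_primary := by
  intro rows primary_only _
  unfold Spec_select_primary select_primary select_primary_alt
  cases primary_only with
  | false => rfl
  | true =>
    simp only [Bool.not_true, if_neg (by decide : ¬ (false = true))]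
    have h := pvInv_fold rows PySem.Dict.empty PySem.Dict.empty
      ⟨by simp [PySem.Dict.empty], by simp [PySem.Dict.empty], by simp [PySem.Dict.keys, PySem.Dict.empty]⟩
    obtain ⟨hitems, -, -⟩ := h
    rw [PySem.List.foldl_append_singleton_eq_map, PySem.Dict.values, hitems]
    simp [pvF]
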